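-- pv_equiv track=rewrite | github.com/leowheeler1/project4main | utils/transformdata.py | binner
-- ===== SOURCE A (Python) =====
-- def binner(scores):
--     output = []
--     for score in scores:
--         if score > 900:
--             output.append(1)
--         elif score > 675:
--             output.append(2)
--         elif score > 375:
--             output.append(3)
--         elif score > 100:
--             output.append(4)
--         else:
--             output.append(5)
--     return output
-- ===== SOURCE B (Python) =====
-- import bisect
--
-- THRESHOLDS = [100, 375, 675, 900]
--
-- def binner(scores):
--     return [5 - bisect.bisect_left(THRESHOLDS, score) for score in scores]
-- ===== Notes on version B (the rewrite author's own statement) =====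
-- stated objective: idiomatic
-- what changed: Replaced the per-element if/elif comparison cascade building a list by append with a sorted threshold table queried by binary search (bisect_left) inside a comprehension.
import Mathlib
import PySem

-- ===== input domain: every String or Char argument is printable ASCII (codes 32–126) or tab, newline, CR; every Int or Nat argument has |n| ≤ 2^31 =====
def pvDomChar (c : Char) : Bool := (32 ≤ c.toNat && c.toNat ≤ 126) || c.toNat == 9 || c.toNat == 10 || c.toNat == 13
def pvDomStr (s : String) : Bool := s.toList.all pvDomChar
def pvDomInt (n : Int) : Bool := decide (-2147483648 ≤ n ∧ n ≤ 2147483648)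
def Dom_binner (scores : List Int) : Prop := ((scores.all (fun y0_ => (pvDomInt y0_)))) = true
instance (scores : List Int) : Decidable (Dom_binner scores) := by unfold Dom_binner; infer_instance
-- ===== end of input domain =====

-- B replaces A's if/elif comparison cascade by a binary-search (bisect_left) lookup in a sorted threshold table; objective: idiomatic.


-- ===== PORT A =====
-- literal transliteration of A: loop over scores appending via an if/elif cascade
def binner (scores : List Int) : List Int :=
  scores.foldl (fun output score =>
    output ++ [if score > 900 then (1 : Int)
               else if score > 675 then 2
               else if score > 375 then 3
               else if score > 100 then 4
               else 5]) []

-- ===== PORT B =====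
def THRESHOLDS : List Int := [100, 375, 675, 900]

-- port of Python's bisect.bisect_left loop (lo=0, hi=len; while lo<hi: mid=(lo+hi)//2; …).
-- fuel = list length bounds the number of iterations (the interval shrinks each step), so this is exact.
def bisectGo (a : List Int) (x : Int) : Nat → Nat → Nat → Nat
  | 0, lo, _ => lo
  | fuel+1, lo, hi =>
    if lo < hi then
      let mid := (lo + hi) / 2
      if a.getD mid 0 < x then bisectGo a x fuel (mid + 1) hi
      else bisectGo a x fuel lo mid
    else lo

def bisectLeft (a : List Int) (x : Int) : Nat :=
  bisectGo a x a.length 0 a.length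

def binner_alt (scores : List Int) : List Int :=
  scores.map (fun score => (5 : Int) - bisectLeft THRESHOLDS score)

-- ===== PRECONDITION & SPEC =====
def Spec_binner (scores : List Int) (out : List Int) : Prop := out = binner_alt scores
instance (scores : List Int) (out : List Int) : Decidable (Spec_binner scores out) := by unfold Spec_binner; infer_instance

-- ===== CLAIM (what is proved, stated in full; the proofs are below) =====
def Claim_equal_binner : Prop := ∀ (scores : List Int), Dom_binner scores → Spec_binner scores (binner scores)

-- ===== LEMMAS AND PROOFS =====

-- per-element agreement: the binary-search label equals the cascade label
theorem label_eq (s : Int) :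
    (5 : Int) - bisectLeft THRESHOLDS s
      = (if s > 900 then (1 : Int) else if s > 675 then 2 else if s > 375 then 3
         else if s > 100 then 4 else 5) := by
  simp only [bisectLeft, THRESHOLDS, bisectGo, List.length, List.getD, List.getElem?_cons_succ,
    List.getElem?_cons_zero]
  norm_num
  split_ifs <;> omega

theorem binner_foldl_general (scores : List Int) (acc : List Int) :
    scores.foldl (fun output score =>
      output ++ [if score > 900 then (1 : Int)
                 else if score > 675 then 2
                 else if score > 375 then 3
                 else if score > 100 then 4
                 else 5]) acc
      = acc ++ scores.map (fun score => (5 : Int) - bisectLeft THRESHOLDS score) := by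
  induction scores generalizing acc with
  | nil => simp
  | cons x xs ih => simp [List.foldl, ih, label_eq]

-- ===== VERDICT (by name: the statement is the Claim_ definition above) =====
theorem binner_spec : Claim_equal_binner := by
  intro scores _
  unfold Spec_binner binner binner_alt
  simpa using binner_foldl_general scores []
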